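-- pv_equiv track=rewrite | github.com/TezzaMichael/AdventOfCode2023 | Advent7/main2.py | CartaAlta
-- ===== SOURCE A (Python) =====
-- def CartaAlta(stringa):
--     if 'J' in stringa :
--         return False
--     else:
--         lista = []
--         for i in stringa:
--             if i not in lista:
--                 lista.append(i)
--             else:
--                 return False
--         return True
-- ===== SOURCE B (Python) =====
-- def CartaAlta(stringa):
--     return 'J' not in stringa and len(set(stringa)) == len(stringa)
-- ===== Notes on version B (the rewrite author's own statement) =====
-- stated objective: simpler
-- what changed: Replaces the early-return loop that incrementally builds a seen-list with a single boolean expression: a joker-character membership test combined with a set-size-vs-length comparison to detect duplicates.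
import Mathlib
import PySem

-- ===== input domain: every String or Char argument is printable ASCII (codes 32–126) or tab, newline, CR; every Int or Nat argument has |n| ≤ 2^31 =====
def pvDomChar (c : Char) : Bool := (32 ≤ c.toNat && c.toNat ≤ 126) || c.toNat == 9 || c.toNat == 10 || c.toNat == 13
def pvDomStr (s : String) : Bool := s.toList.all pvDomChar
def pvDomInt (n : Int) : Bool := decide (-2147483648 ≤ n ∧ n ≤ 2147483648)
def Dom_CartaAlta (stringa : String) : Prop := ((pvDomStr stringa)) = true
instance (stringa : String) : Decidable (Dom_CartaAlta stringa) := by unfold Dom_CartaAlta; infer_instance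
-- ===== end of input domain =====

-- B replaces A's early-return loop with a seen-list by a single boolean expression (no-'J' test && set-size == string length); objective: simpler.

-- ===== PORT A =====
def CartaAltaLoop (l : List Char) (lista : List Char) : Bool :=
  match l with
  | [] => true
  | i :: rest =>
    if !(lista.contains i) then CartaAltaLoop rest (lista ++ [i])
    else false

def CartaAlta (stringa : String) : Bool :=
  if stringa.toList.contains 'J' then false
  else CartaAltaLoop stringa.toList []

-- ===== PORT B =====
-- B: single boolean expression, set-size comparison for distinctness
def CartaAlta_alt (stringa : String) : Bool :=
  !(stringa.toList.contains 'J') && ((PySem.Set.ofList stringa.toList).length == stringa.toList.length)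

-- ===== PRECONDITION & SPEC =====
def Spec_CartaAlta (stringa : String) (out : Bool) : Prop := out = CartaAlta_alt stringa
instance (stringa : String) (out : Bool) : Decidable (Spec_CartaAlta stringa out) := by unfold Spec_CartaAlta; infer_instance

-- ===== CLAIM (what is proved, stated in full; the proofs are below) =====
def Claim_equal_CartaAlta : Prop := ∀ (stringa : String), Dom_CartaAlta stringa → Spec_CartaAlta stringa (CartaAlta stringa)

-- ===== LEMMAS AND PROOFS =====

-- ===== VERDICT (by name: the statement is the Claim_ definition above) =====
-- loop characterisation: with accumulator `lista`, the loop decides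
-- "l has no duplicates and no element of l is already in lista"
theorem loop_char (l lista : List Char) :
    CartaAltaLoop l lista = decide (l.Nodup ∧ ∀ x ∈ l, x ∉ lista) := by
  induction l generalizing lista with
  | nil => simp [CartaAltaLoop]
  | cons i rest ih =>
    simp only [CartaAltaLoop, ih]
    by_cases h : i ∈ lista
    · simp [h]
    · simp only [h, List.contains_eq_mem, Bool.not_eq_true', decide_eq_false_iff_not,
        not_false_iff, if_pos, decide_eq_decide]
      simp only [List.nodup_cons, List.mem_cons, List.mem_append]
      constructor
      · rintro ⟨hn, hf⟩
        exact ⟨⟨fun hir => (hf i hir) (Or.inr (Or.inl rfl)), hn⟩,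
          fun x hx hm => by
            rcases hx with rfl | hx
            · exact h hm
            · rcases (by simpa using hf x hx : ¬(x ∈ lista ∨ x = i)) with hni
              exact hni (Or.inl hm)⟩
      · rintro ⟨⟨hir, hn⟩, hf⟩
        refine ⟨hn, fun x hx hm => ?_⟩
        rcases (by simpa using hm : x ∈ lista ∨ x = i) with hxl | rfl
        · exact hf x (Or.inr hx) hxl
        · exact hir hx

theorem ofList_length_iff (l : List Char) :
    ((PySem.Set.ofList l).length == l.length) = decide l.Nodup := by
  by_cases h : l.Nodup
  · rw [PySem.Set.ofList_eq_self_of_nodup l h]; simp [h]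
  · simp only [h, decide_false, beq_eq_false_iff_ne, ne_eq]
    intro he
    have hmem : (PySem.Set.ofList l).toFinset = l.toFinset := by
      ext x; simp [List.mem_toFinset, PySem.Set.mem_ofList]
    have hc : l.toFinset.card = l.length := by
      rw [← hmem, List.toFinset_card_of_nodup (PySem.Set.nodup_ofList l), he]
    exact h (Multiset.toFinset_card_eq_card_iff_nodup.mp hc)

theorem CartaAlta_spec : Claim_equal_CartaAlta := by
  intro s _
  unfold Spec_CartaAlta CartaAlta CartaAlta_alt
  by_cases hJ : 'J' ∈ s.toList
  · simp [hJ]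
  · have h1 : s.toList.contains 'J' = false := by simp [hJ]
    rw [h1, if_neg (by simp), loop_char, ofList_length_iff]
    simp
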